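-- pv_equiv track=rewrite | github.com/yasuo626/IDKB | WorkNode/idkb_work/work/krllm/__init__.py | text_merge
-- ===== SOURCE A (Python) =====
-- from typing import List
--
-- def text_merge(texts:List[str],min_length=10):
--     l=len(texts)
--     if l<2:
--         return texts
--     lens=[len(text) for text in texts]
--     s=0
--     i=0
--     j=0
--     mtexts=[]
--     while j<l:
--         if s>=min_length:
--             mtexts.append(" ".join(texts[i:j]))
--             i=j
--             s=0
--         s+=lens[j]
--         j+=1
--
--     return mtexts
-- ===== SOURCE B (Python) =====
-- def text_merge(texts, min_length=10):
--     l = len(texts)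
--     if l < 2:
--         return texts
--     # prefix[k] = total length of the first k texts
--     prefix = [0]
--     for t in texts:
--         prefix.append(prefix[-1] + len(t))
--     chunks = []
--     i = 0
--     while True:
--         # binary-search the first boundary b > i with prefix[b] - prefix[i] >= min_length
--         target = prefix[i] + min_length
--         lo, hi = i + 1, l + 1
--         while lo < hi:
--             mid = (lo + hi) // 2
--             if prefix[mid] < target:
--                 lo = mid + 1
--             else:
--                 hi = mid
--         if lo >= l:
--             return chunks
--         chunks.append(" ".join(texts[i:lo]))
--         i = lo
-- ===== Notes on version B (the rewrite author's own statement) =====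
-- stated objective: alternative
-- what changed: Replaces A's element-by-element accumulator sweep with a prefix-sum table of text lengths plus binary-search jumps to each next chunk boundary.
-- intended difference: On lists of >= 2 texts with min_length <= 0 the empty accumulation already satisfies the threshold, so A emits a spurious leading empty chunk (['', texts[0], ..., texts[-2]]); B returns [texts[0], ..., texts[-2]] (each text its own chunk, last dropped as always), which is the intended chunking for a vacuous minimum length. — e.g. on text_merge(["ab", "c"], 0): A returns ["", "ab"], B returns ["ab"]
import Mathlib
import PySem

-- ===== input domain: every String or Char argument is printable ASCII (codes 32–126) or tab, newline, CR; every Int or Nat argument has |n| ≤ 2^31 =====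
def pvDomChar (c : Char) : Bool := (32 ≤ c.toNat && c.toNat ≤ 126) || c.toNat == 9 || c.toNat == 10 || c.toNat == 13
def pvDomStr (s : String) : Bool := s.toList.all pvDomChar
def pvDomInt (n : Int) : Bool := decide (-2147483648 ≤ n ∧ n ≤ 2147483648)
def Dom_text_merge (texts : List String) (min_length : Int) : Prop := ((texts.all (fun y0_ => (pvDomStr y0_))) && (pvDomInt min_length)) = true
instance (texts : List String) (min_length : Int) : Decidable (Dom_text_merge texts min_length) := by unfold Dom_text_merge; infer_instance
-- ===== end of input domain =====

-- B replaces A's element-by-element accumulator sweep with a prefix-sum table of the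
-- text lengths plus binary-search jumps to each next chunk boundary (objective: alternative).

-- ===== PORT A =====
-- the while loop of A; fuel = number of remaining iterations (the loop runs exactly len(texts) times)
def text_merge_loopA (texts : List String) (lens : List Int) (min_length : Int) :
    Nat → Int → Int → Int → List String → List String
  | 0, _, _, _, mtexts => mtexts
  | n + 1, s, i, j, mtexts =>
    if min_length ≤ s then
      -- flush: append " ".join(texts[i:j]), i=j, s=0; then s += lens[j]; j += 1
      text_merge_loopA texts lens min_length n
        (0 + PySem.List.pyGetD lens j 0) j (j + 1)
        (mtexts ++ [PySem.Str.join " " (PySem.List.slice texts (some i) (some j))])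
    else
      text_merge_loopA texts lens min_length n
        (s + PySem.List.pyGetD lens j 0) i (j + 1) mtexts

def text_merge (texts : List String) (min_length : Int) : List String :=
  let l : Int := PySem.List.len texts
  if l < 2 then texts
  else
    let lens := texts.map PySem.Str.len
    text_merge_loopA texts lens min_length texts.length 0 0 0 []

-- ===== PORT B =====
-- hand-written binary search of Source B: first index r in [lo, hi) with target ≤ pfx[r], else hi.
-- Fuel bounds the iterations (hi - lo suffices: the interval shrinks every step); indices are
-- provably nonnegative and in range, so List.getD is exact for prefix[mid].
def text_merge_bsearch (pfx : List Int) (target : Int) :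
    Nat → Nat → Nat → Nat
  | 0, lo, _ => lo
  | d + 1, lo, hi =>
    if lo < hi then
      let mid := (lo + hi) / 2
      if pfx.getD mid 0 < target then text_merge_bsearch pfx target d (mid + 1) hi
      else text_merge_bsearch pfx target d lo mid
    else lo

-- the `while True` loop of Source B; i strictly increases each iteration, so fuel = len(texts) suffices
def text_merge_loopB (texts : List String) (pfx : List Int) (min_length : Int) (l : Nat) :
    Nat → Nat → List String → List String
  | 0, _, chunks => chunks
  | n + 1, i, chunks =>
    let lo := text_merge_bsearch pfx (pfx.getD i 0 + min_length) (l - i) (i + 1) (l + 1)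
    if l ≤ lo then chunks
    else
      text_merge_loopB texts pfx min_length l n lo
        (chunks ++ [PySem.Str.join " " (PySem.List.slice texts (some (i : Int)) (some (lo : Int)))])

def text_merge_alt (texts : List String) (min_length : Int) : List String :=
  let l := texts.length
  if l < 2 then texts
  else
    let pfx := texts.foldl
      (fun acc t => acc ++ [PySem.List.pyGetD acc (-1) 0 + PySem.Str.len t]) [0]
    text_merge_loopB texts pfx min_length l l 0 []

-- ===== PRECONDITION & SPEC =====
-- On lists of ≥ 2 texts with min_length ≤ 0 the empty accumulation already satisfies the
-- threshold, so A emits a spurious leading empty chunk ('' :: texts.dropLast); B returns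
-- texts.dropLast (each text its own chunk, last dropped as always), the intended chunking
-- for a vacuous minimum length.
def D_text_merge (texts : List String) (min_length : Int) : Prop :=
  2 ≤ texts.length ∧ min_length ≤ 0
instance (texts : List String) (min_length : Int) : Decidable (D_text_merge texts min_length) := by
  unfold D_text_merge; infer_instance

def Spec_text_merge (texts : List String) (min_length : Int) (out : List String) : Prop :=
  ¬ D_text_merge texts min_length → out = text_merge_alt texts min_length
instance (texts : List String) (min_length : Int) (out : List String) : Decidable (Spec_text_merge texts min_length out) := by unfold Spec_text_merge; infer_instance

def pvDiffWitness_text_merge : List String × Int := (["ab", "c"], 0)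
def pvDiffWitnessOut_text_merge : (List String) × (List String) := (["", "ab"], ["ab"])

-- ===== CLAIM (what is proved, stated in full; the proofs are below) =====
def Claim_unchanged_text_merge : Prop := ∀ (texts : List String) (min_length : Int), Dom_text_merge texts min_length → Spec_text_merge texts min_length (text_merge texts min_length)
def Claim_changed_text_merge : Prop := Dom_text_merge (pvDiffWitness_text_merge.1) (pvDiffWitness_text_merge.2) ∧ D_text_merge (pvDiffWitness_text_merge.1) (pvDiffWitness_text_merge.2) ∧ text_merge (pvDiffWitness_text_merge.1) (pvDiffWitness_text_merge.2) = pvDiffWitnessOut_text_merge.1 ∧ text_merge_alt (pvDiffWitness_text_merge.1) (pvDiffWitness_text_merge.2) = pvDiffWitnessOut_text_merge.2 ∧ pvDiffWitnessOut_text_merge.1 ≠ pvDiffWitnessOut_text_merge.2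
def Claim_exact_text_merge : Prop := ∀ (texts : List String) (min_length : Int), Dom_text_merge texts min_length → D_text_merge texts min_length → text_merge texts min_length ≠ text_merge_alt texts min_length

-- ===== LEMMAS AND PROOFS =====

-- sT texts k = total length of the first k texts (the value prefix[k] holds)
def sT (texts : List String) (k : Nat) : Int := ((texts.take k).map PySem.Str.len).sum

theorem str_len_nonneg (t : String) : 0 ≤ PySem.Str.len t := by
  rw [PySem.Str.len_eq]; positivity

theorem sT_succ (texts : List String) (k : Nat) (hk : k < texts.length) :
    sT texts (k + 1) = sT texts k + PySem.Str.len texts[k] := by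
  unfold sT
  rw [List.map_take, List.map_take,
    List.sum_take_succ (texts.map PySem.Str.len) k (by simpa using hk)]
  simp

theorem sT_le_succ (texts : List String) (k : Nat) : sT texts k ≤ sT texts (k + 1) := by
  by_cases hk : k < texts.length
  · rw [sT_succ texts k hk]
    have := str_len_nonneg texts[k]
    omega
  · simp [sT, List.take_of_length_le (by omega : texts.length ≤ k),
      List.take_of_length_le (by omega : texts.length ≤ k + 1)]

theorem sT_mono (texts : List String) {a b : Nat} (h : a ≤ b) : sT texts a ≤ sT texts b := by
  induction b with
  | zero => simp_all
  | succ b ih =>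
    rcases Nat.lt_or_ge a (b + 1) with h' | h'
    · exact le_trans (ih (by omega)) (sT_le_succ texts b)
    · have : a = b + 1 := by omega
      simp [this]

-- the prefix fold of B's port is a scanl
theorem foldl_prefix_eq_scanl (xs : List String) :
    ∀ (init : List Int) (h : init ≠ []),
      xs.foldl (fun acc t => acc ++ [PySem.List.pyGetD acc (-1) 0 + PySem.Str.len t]) init
        = init.dropLast ++ List.scanl (fun s t => s + PySem.Str.len t) (init.getLast h) xs := by
  induction xs with
  | nil => intro init h; simp [List.dropLast_append_getLast h]
  | cons t xs ih =>
    intro init h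
    simp only [List.foldl_cons, List.scanl_cons]
    rw [PySem.List.pyGetD_neg_one init 0 h]
    rw [ih (init ++ [init.getLast h + PySem.Str.len t]) (by simp)]
    rw [List.dropLast_concat, List.getLast_concat]
    calc init ++ List.scanl (fun s t => s + PySem.Str.len t) (init.getLast h + PySem.Str.len t) xs
        = (init.dropLast ++ [init.getLast h])
            ++ List.scanl (fun s t => s + PySem.Str.len t) (init.getLast h + PySem.Str.len t) xs := by
          rw [List.dropLast_append_getLast]
      _ = init.dropLast ++ init.getLast h
            :: List.scanl (fun s t => s + PySem.Str.len t) (init.getLast h + PySem.Str.len t) xs := by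
          simp

theorem scanl_getD (xs : List String) :
    ∀ (k : Nat) (c : Int), k ≤ xs.length →
      (List.scanl (fun s t => s + PySem.Str.len t) c xs).getD k 0 = c + sT xs k := by
  induction xs with
  | nil =>
    intro k c hk
    have hk0 : k = 0 := by simpa using hk
    subst hk0; simp [sT]
  | cons t xs ih =>
    intro k c hk
    cases k with
    | zero => simp [sT]
    | succ k =>
      simp only [List.scanl_cons, List.getD_cons_succ]
      rw [ih k (c + PySem.Str.len t) (by simpa using hk)]
      rw [show sT (t :: xs) (k + 1) = PySem.Str.len t + sT xs k from by
        simp [sT, List.take_succ_cons]]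
      ring

-- specification of the hand-written binary search
theorem bsearch_spec (pfx : List Int) (target : Int)
    (hmono : ∀ a b : Nat, a ≤ b → b < pfx.length → pfx.getD a 0 ≤ pfx.getD b 0) :
    ∀ (d lo hi : Nat), hi - lo ≤ d → lo ≤ hi → hi ≤ pfx.length →
      lo ≤ text_merge_bsearch pfx target d lo hi ∧
      text_merge_bsearch pfx target d lo hi ≤ hi ∧
      (∀ k, lo ≤ k → k < text_merge_bsearch pfx target d lo hi → pfx.getD k 0 < target) ∧
      (text_merge_bsearch pfx target d lo hi < hi →
        target ≤ pfx.getD (text_merge_bsearch pfx target d lo hi) 0) := by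
  intro d
  induction d with
  | zero =>
    intro lo hi hd hle hlen
    have hhi : hi = lo := by omega
    subst hhi
    exact ⟨le_refl _, le_refl _, fun k h1 h2 => absurd h2 (by simp only [text_merge_bsearch]; omega),
      fun h => absurd h (by simp only [text_merge_bsearch]; omega)⟩
  | succ d ih =>
    intro lo hi hd hle hlen
    rw [text_merge_bsearch]
    by_cases h : lo < hi
    · simp only [h, if_true]
      set mid := (lo + hi) / 2 with hmid
      have hmlo : lo ≤ mid := by omega
      have hmhi : mid < hi := by omega
      by_cases hcmp : pfx.getD mid 0 < target
      · simp only [hcmp, if_true]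
        obtain ⟨h1, h2, h3, h4⟩ := ih (mid + 1) hi (by omega) (by omega) hlen
        refine ⟨by omega, h2, ?_, h4⟩
        intro k hk1 hk2
        by_cases hkm : k ≤ mid
        · exact lt_of_le_of_lt (hmono k mid hkm (by omega)) hcmp
        · exact h3 k (by omega) hk2
      · simp only [hcmp, if_false]
        have e1 : mid - lo ≤ d := by omega
        have e2 : lo ≤ mid := by omega
        have e3 : mid ≤ pfx.length := by omega
        obtain ⟨h1, h2, h3, h4⟩ := ih lo mid e1 e2 e3
        refine ⟨h1, by omega, h3, ?_⟩
        intro hr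
        rcases Nat.lt_or_ge (text_merge_bsearch pfx target d lo mid) mid with hr' | hr'
        · exact h4 hr'
        · have : text_merge_bsearch pfx target d lo mid = mid := by omega
          rw [this]; omega
    · simp only [h, if_false]
      exact ⟨le_refl _, by omega, fun k h1 h2 => absurd h2 (by omega), fun hh => hh.elim⟩

-- lower bound on bsearch, with no hypotheses (fuel accounting)
theorem bsearch_ge (pfx : List Int) (target : Int) :
    ∀ (d lo hi : Nat), lo ≤ text_merge_bsearch pfx target d lo hi := by
  intro d
  induction d with
  | zero => intro lo hi; simp [text_merge_bsearch]
  | succ d ih =>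
    intro lo hi
    rw [text_merge_bsearch]
    by_cases h : lo < hi
    · simp only [h, if_true]
      by_cases hcmp : pfx.getD ((lo + hi) / 2) 0 < target
      · simp only [hcmp, if_true]
        have := ih ((lo + hi) / 2 + 1) hi
        omega
      · simp only [hcmp, if_false]
        exact ih lo ((lo + hi) / 2)
    · simp [h]

-- B's loop: accumulator comes out front
theorem loopB_acc (texts : List String) (pfx : List Int) (min_length : Int) (l : Nat) :
    ∀ (n i : Nat) (acc : List String),
      text_merge_loopB texts pfx min_length l n i acc
        = acc ++ text_merge_loopB texts pfx min_length l n i [] := by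
  intro n
  induction n with
  | zero => intro i acc; simp [text_merge_loopB]
  | succ n ih =>
    intro i acc
    simp only [text_merge_loopB]
    by_cases h : l ≤ text_merge_bsearch pfx (pfx.getD i 0 + min_length) (l - i) (i + 1) (l + 1)
    · rw [if_pos h, if_pos h]; simp
    · rw [if_neg h, if_neg h]
      rw [ih _ (acc ++ _), ih _ ([] ++ _)]
      simp

-- B's loop from an exhausted index returns the accumulator
theorem loopB_done (texts : List String) (pfx : List Int) (min_length : Int) (l : Nat) :
    ∀ (n i : Nat) (acc : List String), l ≤ i →
      text_merge_loopB texts pfx min_length l n i acc = acc := by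
  intro n
  cases n with
  | zero => intro i acc _; rfl
  | succ n =>
    intro i acc hi
    simp only [text_merge_loopB]
    have := bsearch_ge pfx (pfx.getD i 0 + min_length) (l - i) (i + 1) (l + 1)
    rw [if_pos (by omega)]

-- B's loop is fuel-insensitive once the fuel covers the remaining indices
theorem loopB_fuel (texts : List String) (pfx : List Int) (min_length : Int) (l : Nat) :
    ∀ (n n' i : Nat), l - i ≤ n → l - i ≤ n' →
      text_merge_loopB texts pfx min_length l n i []
        = text_merge_loopB texts pfx min_length l n' i [] := by
  intro n
  induction n with
  | zero =>
    intro n' i hn hn'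
    rw [loopB_done texts pfx min_length l n' i [] (by omega)]
    rfl
  | succ n ih =>
    intro n' i hn hn'
    cases n' with
    | zero =>
      rw [loopB_done texts pfx min_length l (n + 1) i [] (by omega)]
      rfl
    | succ n' =>
      simp only [text_merge_loopB]
      by_cases h : l ≤ text_merge_bsearch pfx (pfx.getD i 0 + min_length) (l - i) (i + 1) (l + 1)
      · rw [if_pos h, if_pos h]
      · rw [if_neg h, if_neg h]
        have hge := bsearch_ge pfx (pfx.getD i 0 + min_length) (l - i) (i + 1) (l + 1)
        rw [loopB_acc texts pfx min_length l n, loopB_acc texts pfx min_length l n']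
        rw [ih n' _ (by omega) (by omega)]

-- getD on the prefix table reads a partial sum
theorem pfx_get (texts : List String) (k : Nat) (hk : k ≤ texts.length) :
    (List.scanl (fun s t => s + PySem.Str.len t) 0 texts).getD k 0 = sT texts k := by
  have := scanl_getD texts k 0 hk
  simpa using this

-- the prefix table is nondecreasing
theorem pfx_mono (texts : List String) :
    ∀ a b : Nat, a ≤ b →
      b < (List.scanl (fun s t => s + PySem.Str.len t) 0 texts).length →
      (List.scanl (fun s t => s + PySem.Str.len t) 0 texts).getD a 0
        ≤ (List.scanl (fun s t => s + PySem.Str.len t) 0 texts).getD b 0 := by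
  intro a b hab hb
  rw [List.length_scanl] at hb
  rw [pfx_get texts a (by omega), pfx_get texts b (by omega)]
  exact sT_mono texts hab

-- A's sums are sums of nonnegative lengths
theorem lens_nonneg (texts : List String) (j : Int) :
    0 ≤ PySem.List.pyGetD (texts.map PySem.Str.len) j 0 := by
  by_cases hin : PySem.Raise.InRange (texts.map PySem.Str.len).length j
  · have hmem := PySem.List.pyGetD_mem (texts.map PySem.Str.len) (i := j) 0 hin
    obtain ⟨t, _, ht⟩ := List.mem_map.mp hmem
    rw [← ht]
    exact str_len_nonneg t
  · rw [PySem.List.pyGetD_of_none _ _ _ ((PySem.List.pyGet?_eq_none_iff _ _).mpr hin)]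

-- ===== main synchronisation lemma =====
-- A's loop, entered at iteration j with segment start i, accumulated s = sT j - sT i and
-- no flush due at any index in (i, j), produces exactly B's remaining chunks.
theorem loopAB_sync (texts : List String) (min_length : Int) (hm : 1 ≤ min_length) :
    ∀ (nj j i : Nat) (acc : List String),
      nj = texts.length - j → i ≤ j → j ≤ texts.length →
      (∀ k, i < k → k < j → sT texts k - sT texts i < min_length) →
      text_merge_loopA texts (texts.map PySem.Str.len) min_length nj
          (sT texts j - sT texts i) (i : Int) (j : Int) acc
        = acc ++ text_merge_loopB texts
            (List.scanl (fun s t => s + PySem.Str.len t) 0 texts)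
            min_length texts.length (texts.length - i) i [] := by
  intro nj
  induction nj with
  | zero =>
    intro j i acc hnj hij hjl hinv
    have hj : j = texts.length := by omega
    subst hj
    simp only [text_merge_loopA]
    rcases Nat.lt_or_ge i texts.length with hiL | hiL
    · have hfuel : texts.length - i = (texts.length - i - 1) + 1 := by omega
      rw [hfuel]
      simp only [text_merge_loopB]
      obtain ⟨hs1, hs2, hs3, hs4⟩ := bsearch_spec
        (List.scanl (fun s t => s + PySem.Str.len t) 0 texts)
        ((List.scanl (fun s t => s + PySem.Str.len t) 0 texts).getD i 0 + min_length)
        (pfx_mono texts) (texts.length - i) (i + 1) (texts.length + 1)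
        (by omega) (by omega) (by rw [List.length_scanl])
      set r := text_merge_bsearch
        (List.scanl (fun s t => s + PySem.Str.len t) 0 texts)
        ((List.scanl (fun s t => s + PySem.Str.len t) 0 texts).getD i 0 + min_length)
        (texts.length - i) (i + 1) (texts.length + 1) with hrdef
      rw [if_pos ?hstop]
      case hstop =>
        by_contra hr
        rw [Nat.not_le] at hr
        have h4 := hs4 (by omega)
        have hgi := pfx_get texts i (by omega)
        have hgr := pfx_get texts r (by omega)
        have hiv := hinv r (by omega) (by omega)
        omega
      simp
    · have hfuel : texts.length - i = 0 := by omega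
      rw [hfuel]
      simp [text_merge_loopB]
  | succ n ih =>
    intro j i acc hnj hij hjl hinv
    have hjL : j < texts.length := by omega
    have hlens : PySem.List.pyGetD (texts.map PySem.Str.len) (j : Int) 0
        = PySem.Str.len texts[j] := by
      rw [PySem.List.pyGetD_natCast]
      rw [List.getD_eq_getElem _ _ (by simpa using hjL)]
      simp
    have hcast : ((j : Int) + 1) = (((j + 1 : Nat)) : Int) := by push_cast; ring
    simp only [text_merge_loopA]
    by_cases hflush : min_length ≤ sT texts j - sT texts i
    · rw [if_pos hflush]
      have hij' : i < j := by
        rcases Nat.lt_or_ge i j with h' | h'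
        · exact h'
        · exfalso
          have : i = j := by omega
          subst this
          simp at hflush
          omega
      have harg : (0 : Int) + PySem.List.pyGetD (texts.map PySem.Str.len) (j : Int) 0
          = sT texts (j + 1) - sT texts j := by
        rw [hlens, sT_succ texts j hjL]; ring
      rw [harg, hcast]
      rw [ih (j + 1) j _ (by omega) (by omega) (by omega) (by intro k hk1 hk2; omega)]
      -- B side: one step of loopB from i lands exactly on boundary j
      have hfuel : texts.length - i = (texts.length - i - 1) + 1 := by omega
      conv_rhs => rw [hfuel]
      simp only [text_merge_loopB]
      obtain ⟨hs1, hs2, hs3, hs4⟩ := bsearch_spec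
        (List.scanl (fun s t => s + PySem.Str.len t) 0 texts)
        ((List.scanl (fun s t => s + PySem.Str.len t) 0 texts).getD i 0 + min_length)
        (pfx_mono texts) (texts.length - i) (i + 1) (texts.length + 1)
        (by omega) (by omega) (by rw [List.length_scanl])
      set r := text_merge_bsearch
        (List.scanl (fun s t => s + PySem.Str.len t) 0 texts)
        ((List.scanl (fun s t => s + PySem.Str.len t) 0 texts).getD i 0 + min_length)
        (texts.length - i) (i + 1) (texts.length + 1) with hrdef
      have hgi := pfx_get texts i (by omega)
      have hrj : r = j := by
        rcases Nat.lt_trichotomy r j with h' | h' | h'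
        · exfalso
          have h4 := hs4 (by omega)
          have hgr := pfx_get texts r (by omega)
          have hiv := hinv r (by omega) (by omega)
          omega
        · exact h'
        · exfalso
          have h3 := hs3 j (by omega) h'
          have hgj := pfx_get texts j (by omega)
          omega
      rw [hrj, if_neg (by omega : ¬ texts.length ≤ j)]
      rw [loopB_acc texts _ min_length texts.length (texts.length - i - 1) j]
      rw [loopB_fuel texts _ min_length texts.length (texts.length - i - 1)
        (texts.length - j) j (by omega) (by omega)]
      simp
    · rw [if_neg hflush]
      have harg : sT texts j - sT texts i + PySem.List.pyGetD (texts.map PySem.Str.len) (j : Int) 0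
          = sT texts (j + 1) - sT texts i := by
        rw [hlens, sT_succ texts j hjL]; ring
      rw [harg, hcast]
      exact ih (j + 1) i acc (by omega) (by omega) (by omega) (by
        intro k hk1 hk2
        rcases Nat.lt_or_ge k j with h' | h'
        · exact hinv k hk1 h'
        · have : k = j := by omega
          subst this
          omega)

-- lengths of the two loops' outputs when min_length ≤ 0 (for the tightness theorem)
theorem loopA_len_of_nonpos (texts : List String) (min_length : Int) (hm0 : min_length ≤ 0) :
    ∀ (n : Nat) (s i j : Int) (acc : List String), 0 ≤ s →
      (text_merge_loopA texts (texts.map PySem.Str.len) min_length n s i j acc).length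
        = acc.length + n := by
  intro n
  induction n with
  | zero => intro s i j acc _; simp [text_merge_loopA]
  | succ n ih =>
    intro s i j acc hs
    simp only [text_merge_loopA]
    rw [if_pos (by omega)]
    rw [ih _ _ _ _ (by have := lens_nonneg texts j; omega)]
    simp
    omega

theorem loopB_len_of_nonpos (texts : List String) (min_length : Int) (hm0 : min_length ≤ 0) :
    ∀ (n i : Nat) (acc : List String), i < texts.length → texts.length - i ≤ n →
      (text_merge_loopB texts (List.scanl (fun s t => s + PySem.Str.len t) 0 texts)
          min_length texts.length n i acc).length
        = acc.length + (texts.length - i - 1) := by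
  intro n
  induction n with
  | zero => intro i acc h1 h2; omega
  | succ n ih =>
    intro i acc h1 h2
    simp only [text_merge_loopB]
    obtain ⟨hs1, hs2, hs3, hs4⟩ := bsearch_spec
      (List.scanl (fun s t => s + PySem.Str.len t) 0 texts)
      ((List.scanl (fun s t => s + PySem.Str.len t) 0 texts).getD i 0 + min_length)
      (pfx_mono texts) (texts.length - i) (i + 1) (texts.length + 1)
      (by omega) (by omega) (by rw [List.length_scanl])
    set r := text_merge_bsearch
      (List.scanl (fun s t => s + PySem.Str.len t) 0 texts)
      ((List.scanl (fun s t => s + PySem.Str.len t) 0 texts).getD i 0 + min_length)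
      (texts.length - i) (i + 1) (texts.length + 1) with hrdef
    have hri : r = i + 1 := by
      rcases Nat.lt_or_ge (i + 1) r with h' | h'
      · exfalso
        have h3 := hs3 (i + 1) (le_refl _) h'
        have := pfx_mono texts i (i + 1) (by omega) (by rw [List.length_scanl]; omega)
        omega
      · omega
    rw [hri]
    rcases Nat.lt_or_ge (i + 1) texts.length with hlt | hge
    · rw [if_neg (by omega)]
      rw [ih (i + 1) _ hlt (by omega)]
      simp
      omega
    · rw [if_pos (by omega)]
      omega

-- ===== VERDICT (by name: the statement is the Claim_ definition above) =====
theorem text_merge_spec : Claim_unchanged_text_merge := by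
  intro texts min_length hdom
  unfold Spec_text_merge
  intro hnD
  by_cases h2 : texts.length < 2
  · simp only [text_merge, text_merge_alt, PySem.List.len_eq]
    rw [if_pos (by exact_mod_cast h2 : (texts.length : Int) < 2), if_pos h2]
  · have hL : 2 ≤ texts.length := by omega
    have hm : 1 ≤ min_length := by
      by_contra hm'
      exact hnD ⟨hL, by omega⟩
    simp only [text_merge, text_merge_alt, PySem.List.len_eq]
    rw [if_neg (by exact_mod_cast h2 : ¬ ((texts.length : Int) < 2)), if_neg (by omega)]
    have hpfx : texts.foldl
        (fun acc t => acc ++ [PySem.List.pyGetD acc (-1) 0 + PySem.Str.len t]) [0]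
        = List.scanl (fun s t => s + PySem.Str.len t) 0 texts := by
      rw [foldl_prefix_eq_scanl texts [0] (by simp)]
      simp
    rw [hpfx]
    have hsync := loopAB_sync texts min_length hm texts.length 0 0 [] (by omega)
      (le_refl 0) (by omega) (by intro k h1 h2; omega)
    have h0 : sT texts 0 = 0 := rfl
    rw [h0, sub_self, Nat.cast_zero, Nat.sub_zero, List.nil_append] at hsync
    exact hsync

theorem text_merge_changed : Claim_changed_text_merge := by
  unfold Claim_changed_text_merge; decide

theorem text_merge_tight : Claim_exact_text_merge := by
  intro texts min_length hdom hD heq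
  obtain ⟨hL, hm0⟩ := hD
  have hA : (text_merge texts min_length).length = texts.length := by
    simp only [text_merge, PySem.List.len_eq]
    rw [if_neg (by exact_mod_cast (by omega : ¬ texts.length < 2) : ¬ ((texts.length : Int) < 2))]
    rw [loopA_len_of_nonpos texts min_length hm0 texts.length 0 0 0 [] (le_refl 0)]
    simp
  have hB : (text_merge_alt texts min_length).length = texts.length - 1 := by
    simp only [text_merge_alt]
    rw [if_neg (by omega)]
    have hpfx : texts.foldl
        (fun acc t => acc ++ [PySem.List.pyGetD acc (-1) 0 + PySem.Str.len t]) [0]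
        = List.scanl (fun s t => s + PySem.Str.len t) 0 texts := by
      rw [foldl_prefix_eq_scanl texts [0] (by simp)]
      simp
    rw [hpfx]
    rw [loopB_len_of_nonpos texts min_length hm0 texts.length 0 [] (by omega) (by omega)]
    simp
  rw [heq, hB] at hA
  omega
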